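-- pv_equiv track=rewrite | github.com/DenuvoSoftwareSolutions/GAMBA | src/utils/batch.py | __get_largest_list_indices
-- ===== SOURCE A (Python) =====
-- def __get_largest_list_indices(lists):
--     assert(len(lists) > 0)
--
--     indices = [0]
--     maxl = len(lists[0])
--
--     for i in range(1, len(lists)):
--         l = len(lists[i])
--         if l == maxl: indices.append(i)
--         elif l > maxl:
--             indices = [i]
--             maxl = l
--
--     return indices
-- ===== SOURCE B (Python) =====
-- def __get_largest_list_indices(lists):
--     assert(len(lists) > 0)
--     maxl = max(len(l) for l in lists)
--     return [i for i in range(len(lists)) if len(lists[i]) == maxl]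
-- ===== Notes on version B (the rewrite author's own statement) =====
-- stated objective: simpler
-- what changed: Replaces the single-pass reset-on-new-max index tracking with a two-pass decomposition: compute the maximum length once, then filter the indices attaining it.
import Mathlib
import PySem

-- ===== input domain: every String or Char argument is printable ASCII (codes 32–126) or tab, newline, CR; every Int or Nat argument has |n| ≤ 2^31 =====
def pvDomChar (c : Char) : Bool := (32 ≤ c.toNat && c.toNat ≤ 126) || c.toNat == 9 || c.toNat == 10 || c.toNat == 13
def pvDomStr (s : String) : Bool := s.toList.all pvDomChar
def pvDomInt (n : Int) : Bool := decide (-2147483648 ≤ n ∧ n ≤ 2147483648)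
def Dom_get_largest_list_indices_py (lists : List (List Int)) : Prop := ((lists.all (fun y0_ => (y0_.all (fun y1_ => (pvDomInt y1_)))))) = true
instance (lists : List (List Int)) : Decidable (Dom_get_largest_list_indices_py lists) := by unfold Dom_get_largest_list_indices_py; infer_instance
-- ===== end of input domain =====

-- B computes the maximum length once and then filters the indices attaining it (two passes),
-- instead of A's single-pass reset-on-new-max tracking; same O(n) cost, simpler decomposition.

-- ===== PORT A =====
def get_largest_list_indices_py (lists : List (List Int)) : List Int :=
  -- assert len(lists) > 0: AssertionError on [] is excluded by Pre_
  let indices : List Int := [0]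
  let maxl : Int := ((PySem.List.pyGetD lists 0 []).length : Int)
  let r := (PySem.List.pyRange 1 lists.length 1).foldl
    (fun acc i =>
      let l : Int := ((PySem.List.pyGetD lists i []).length : Int)
      if l = acc.2 then (acc.1 ++ [i], acc.2)
      else if l > acc.2 then ([i], l)
      else acc) (indices, maxl)
  r.1

-- ===== PORT B =====
def get_largest_list_indices_py_alt (lists : List (List Int)) : List Int :=
  -- assert len(lists) > 0: AssertionError on [] is excluded by Pre_
  -- max(len(l) for l in lists) → PySem.List.max?; nonempty under Pre_, so getD 0 is never the default
  let maxl : Int := (PySem.List.max? (lists.map (fun l => (l.length : Int))) (fun y => y)).getD 0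
  (PySem.List.pyRange 0 lists.length 1).filter
    (fun i => ((PySem.List.pyGetD lists i []).length : Int) = maxl)

-- ===== PRECONDITION & SPEC =====
-- Pre_ excludes only the empty list, on which A (and B) raise AssertionError.
def Pre_get_largest_list_indices_py (lists : List (List Int)) : Prop := lists ≠ []
instance (lists : List (List Int)) : Decidable (Pre_get_largest_list_indices_py lists) := by unfold Pre_get_largest_list_indices_py; infer_instance
def pvWitness_get_largest_list_indices_py : List (List Int) := [[1, 2], [3], [4, 5]]

def Spec_get_largest_list_indices_py (lists : List (List Int)) (out : List Int) : Prop := out = get_largest_list_indices_py_alt lists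
instance (lists : List (List Int)) (out : List Int) : Decidable (Spec_get_largest_list_indices_py lists out) := by unfold Spec_get_largest_list_indices_py; infer_instance

-- ===== CLAIM (what is proved, stated in full; the proofs are below) =====
def Claim_equal_get_largest_list_indices_py : Prop := ∀ (lists : List (List Int)), Dom_get_largest_list_indices_py lists → Pre_get_largest_list_indices_py lists → Spec_get_largest_list_indices_py lists (get_largest_list_indices_py lists)

-- ===== LEMMAS AND PROOFS =====

-- length of lists[i] as an Int (the value both loops compare)
def pvLenAt (lists : List (List Int)) (i : Int) : Int :=
  ((PySem.List.pyGetD lists i []).length : Int)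

-- running maximum of the first k+1 lengths (A's maxl after processing indices 0..k)
def pvM (lists : List (List Int)) : Nat → Int
  | 0 => pvLenAt lists 0
  | k + 1 => max (pvM lists k) (pvLenAt lists k)

theorem pvLenAt_le_pvM (lists : List (List Int)) (k j : Nat) (h : j < k) :
    pvLenAt lists (j : Int) ≤ pvM lists k := by
  induction k with
  | zero => omega
  | succ k ih =>
    rcases Nat.lt_succ_iff_lt_or_eq.mp h with h' | h'
    · exact le_trans (ih h') (le_max_left _ _)
    · subst h'; exact le_max_right _ _

theorem pv_invariant (lists : List (List Int)) (k : Nat) (h1 : 1 ≤ k) :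
    (PySem.List.pyRange 1 (k : Int) 1).foldl
      (fun acc i =>
        let l : Int := pvLenAt lists i
        if l = acc.2 then (acc.1 ++ [i], acc.2)
        else if l > acc.2 then ([i], l)
        else acc) ([0], pvLenAt lists 0)
    = ((PySem.List.pyRange 0 (k : Int) 1).filter
         (fun i => pvLenAt lists i = pvM lists k),
       pvM lists k) := by
  induction k with
  | zero => omega
  | succ k ih =>
    rcases Nat.eq_or_lt_of_le h1 with h' | h'
    · -- k + 1 = 1
      have : k = 0 := by omega
      subst this
      have e1 : PySem.List.pyRange (1:Int) ((0+1 : Nat) : Int) 1 = [] := by decide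
      have e0 : PySem.List.pyRange (0:Int) ((0+1 : Nat) : Int) 1 = [0] := by decide
      rw [e1, e0]
      simp [pvM]
    · have hk : 1 ≤ k := by omega
      have hr : PySem.List.pyRange 1 ((k + 1 : Nat) : Int) 1
          = PySem.List.pyRange 1 (k : Int) 1 ++ [(k : Int)] := by
        push_cast
        exact PySem.List.pyRange_one_succ_right (by exact_mod_cast hk)
      have hr0 : PySem.List.pyRange 0 ((k + 1 : Nat) : Int) 1
          = PySem.List.pyRange 0 (k : Int) 1 ++ [(k : Int)] := by
        push_cast
        exact PySem.List.pyRange_one_succ_right (by positivity)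
      rw [hr, List.foldl_append, ih hk, hr0, List.filter_append]
      simp only [List.foldl_cons, List.foldl_nil]
      rcases lt_trichotomy (pvLenAt lists (k : Int)) (pvM lists k) with hc | hc | hc
      · -- l < maxl : unchanged
        have h2 : pvM lists (k + 1) = pvM lists k := by
          simp [pvM, max_eq_left hc.le]
        rw [h2]
        simp [hc.ne, not_lt_of_gt hc]
      · -- l = maxl : append k
        have h2 : pvM lists (k + 1) = pvM lists k := by
          simp [pvM, hc, max_self]
        rw [h2]
        simp [hc]
      · -- l > maxl : reset
        have h2 : pvM lists (k + 1) = pvLenAt lists (k : Int) := by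
          simp [pvM, max_eq_right hc.le]
        rw [h2]
        have hnil : (PySem.List.pyRange 0 (k : Int) 1).filter
            (fun i => pvLenAt lists i = pvLenAt lists (k : Int)) = [] := by
          rw [List.filter_eq_nil_iff]
          intro i hi
          rw [PySem.List.mem_pyRange_one] at hi
          have hle : pvLenAt lists i ≤ pvM lists k := by
            have := pvLenAt_le_pvM lists k i.toNat (by omega)
            rwa [Int.toNat_of_nonneg hi.1] at this
          simp [(lt_of_le_of_lt hle hc).ne]
        rw [hnil]
        simp [hc.ne', hc]

theorem pvM_succ_eq_foldl (lists : List (List Int)) (k : Nat) :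
    pvM lists (k + 1)
      = ((PySem.List.pyRange 1 ((k + 1 : Nat) : Int) 1).map (pvLenAt lists)).foldl max (pvLenAt lists 0) := by
  induction k with
  | zero =>
    have e1 : PySem.List.pyRange (1:Int) ((0+1 : Nat) : Int) 1 = [] := by decide
    rw [e1]; simp [pvM]
  | succ k ih =>
    have hr : PySem.List.pyRange 1 ((k + 1 + 1 : Nat) : Int) 1
        = PySem.List.pyRange 1 ((k + 1 : Nat) : Int) 1 ++ [((k + 1 : Nat) : Int)] := by
      push_cast
      exact PySem.List.pyRange_one_succ_right (by exact_mod_cast Nat.le_add_left 1 k)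
    rw [hr, List.map_append, List.foldl_append, ← ih]
    simp [pvM]

theorem pvM_eq_maxl (l0 : List Int) (t : List (List Int)) :
    pvM (l0 :: t) (l0 :: t).length
      = (PySem.List.max? ((l0 :: t).map (fun l => (l.length : Int))) (fun y => y)).getD 0 := by
  have hmap : (PySem.List.pyRange 1 (((l0 :: t).length : Nat) : Int) 1).map (pvLenAt (l0 :: t))
      = t.map (fun l => (l.length : Int)) := by
    have comp : pvLenAt (l0 :: t)
        = (fun l : List Int => (l.length : Int)) ∘ (fun j => PySem.List.pyGetD (l0 :: t) j []) := rfl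
    rw [comp, ← List.map_map, PySem.List.map_pyGetD_pyRange' (l0 :: t) [] (by norm_num : (0:Int) ≤ 1)]
    simp
  rw [show (l0 :: t).length = t.length + 1 from rfl, pvM_succ_eq_foldl,
      show t.length + 1 = (l0 :: t).length from rfl, hmap]
  rw [List.map_cons, PySem.List.max?_id_cons]
  simp [pvLenAt, PySem.List.pyGetD]

-- ===== VERDICT (by name: the statement is the Claim_ definition above) =====
theorem get_largest_list_indices_py_spec : Claim_equal_get_largest_list_indices_py := by
  intro lists _ hpre
  unfold Spec_get_largest_list_indices_py get_largest_list_indices_py get_largest_list_indices_py_alt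
  obtain ⟨l0, t, rfl⟩ : ∃ l0 t, lists = l0 :: t := by
    cases lists with
    | nil => exact absurd rfl hpre
    | cons a b => exact ⟨a, b, rfl⟩
  have h := pv_invariant (l0 :: t) (l0 :: t).length (by simp)
  simp only [pvLenAt, PySem.List.pyGetD] at h ⊢
  rw [h, pvM_eq_maxl]
  rfl
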